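-- pv_equiv track=rewrite | github.com/gpwi970725/Programming_Practice | BaekJoon/1697.py | get_time
-- ===== SOURCE A (Python) =====
-- from collections import deque
--
-- def get_time(now, target):
--     next_lists = deque()
--     next_lists.append([0, now])
--     visited = {now}
--
--     while True:
--         now_list = next_lists.popleft()
--         for now in now_list[1:]:
--             if now == target:
--                 return now_list[0]
--
--             next_list = [now_list[0] + 1]
--             if now >= 1:
--                 next_list.append(now - 1)
--             if now <= 100001:
--                 next_list.append(now + 1)
--             if now <= 50000:
--                 next_list.append(now * 2)
--             next_lists.append(next_list)
-- ===== SOURCE B (Python) =====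
-- def _moves(n):
--     ms = []
--     if n >= 1:
--         ms.append(n - 1)
--     if n <= 100001:
--         ms.append(n + 1)
--     if n <= 50000:
--         ms.append(n * 2)
--     return ms
--
--
-- def get_time(now, target):
--     # level-synchronous BFS with a visited set: each state is expanded at most once
--     frontier = {now}
--     visited = {now}
--     t = 0
--     while True:
--         if target in frontier:
--             return t
--         nxt = set()
--         for n in frontier:
--             for m in _moves(n):
--                 if m not in visited:
--                     visited.add(m)
--                     nxt.add(m)
--         frontier = nxt
--         t += 1
-- ===== Notes on version B (the rewrite author's own statement) =====
-- stated objective: alternative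
-- what changed: A's BFS never prunes revisited states (its visited set is created but never consulted), so its queue grows roughly 3^depth; B is a level-synchronous BFS that checks a visited set before enqueueing, expanding each state at most once.
import Mathlib
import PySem

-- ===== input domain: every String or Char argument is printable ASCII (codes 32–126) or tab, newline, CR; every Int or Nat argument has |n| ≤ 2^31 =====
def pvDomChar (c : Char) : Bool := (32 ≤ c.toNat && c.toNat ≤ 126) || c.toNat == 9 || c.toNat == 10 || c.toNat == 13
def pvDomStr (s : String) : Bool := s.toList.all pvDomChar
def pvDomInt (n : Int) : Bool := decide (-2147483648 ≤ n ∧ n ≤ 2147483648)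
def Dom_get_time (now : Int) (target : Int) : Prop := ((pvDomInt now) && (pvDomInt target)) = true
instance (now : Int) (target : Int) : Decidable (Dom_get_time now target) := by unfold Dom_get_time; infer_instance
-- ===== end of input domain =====

-- B replaces A's unpruned BFS (visited created but never consulted; ~3^depth queue) by a
-- level-synchronous BFS that tests the visited set before enqueueing, expanding each state once.
-- Both Pythons loop forever when target is unreachable; the ports are totalized by the same
-- fuel bound on the number of BFS levels (|now| + |target| + 64 levels always reach any
-- reachable target), both returning 0 once the fuel is exhausted.

-- ===== PORT A =====
-- A's deque is FIFO, so entries of BFS depth d are contiguous and processed before any entry of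
-- depth d+1; the port represents the deque level by level (same entries, same left-to-right order).
-- An entry [d, n1, n2, …] is modelled as (d, [n1, n2, …]).

-- next_list = [d+1] + appended neighbours, exactly A's three conditional appends
def pvNextListA (d : Int) (n : Int) : Int × List Int :=
  let l : List Int := []
  let l := if n ≥ 1 then l ++ [n - 1] else l
  let l := if n ≤ 100001 then l ++ [n + 1] else l
  let l := if n ≤ 50000 then l ++ [n * 2] else l
  (d + 1, l)

-- the body of A's `for now in now_list[1:]`: return d on a hit, else collect the pushed lists
def pvScanEntryA (target : Int) (d : Int) : List Int → Sum Int (List (Int × List Int))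
  | [] => Sum.inr []
  | n :: rest =>
    if n = target then Sum.inl d
    else
      match pvScanEntryA target d rest with
      | Sum.inl x => Sum.inl x
      | Sum.inr es => Sum.inr (pvNextListA d n :: es)

-- pop the whole current level, left to right (FIFO order of the deque)
def pvScanLevelA (target : Int) : List (Int × List Int) → Sum Int (List (Int × List Int))
  | [] => Sum.inr []
  | e :: rest =>
    match pvScanEntryA target e.1 e.2 with
    | Sum.inl x => Sum.inl x
    | Sum.inr es =>
      match pvScanLevelA target rest with
      | Sum.inl x => Sum.inl x
      | Sum.inr es' => Sum.inr (es ++ es')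

-- fuel = bound on BFS levels; |now| + |target| + 64 levels always reach any reachable target
def pvFuel (now : Int) (target : Int) : Nat := now.natAbs + target.natAbs + 64

def pvRunA (target : Int) : Nat → List (Int × List Int) → Int
  | 0, _ => 0
  | Nat.succ fuel, lvl =>
    match pvScanLevelA target lvl with
    | Sum.inl d => d
    | Sum.inr next => pvRunA target fuel next

def get_time (now : Int) (target : Int) : Int :=
  pvRunA target (pvFuel now target) [(0, [now])]

-- ===== PORT B =====
-- _moves(n): the three conditional appends
def pvMovesB (n : Int) : List Int :=
  let ms : List Int := []
  let ms := if n ≥ 1 then ms ++ [n - 1] else ms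
  let ms := if n ≤ 100001 then ms ++ [n + 1] else ms
  if n ≤ 50000 then ms ++ [n * 2] else ms

-- `if m not in visited: visited.add(m); nxt.add(m)`; acc = (nxt, visited)
def pvExpandStep (acc : PySem.Set Int × PySem.Set Int) (m : Int) :
    PySem.Set Int × PySem.Set Int :=
  if PySem.Set.contains acc.2 m then acc
  else (PySem.Set.add acc.1 m, PySem.Set.add acc.2 m)

-- one frontier element n: `for m in _moves(n): …`
def pvExpandNode (acc : PySem.Set Int × PySem.Set Int) (n : Int) :
    PySem.Set Int × PySem.Set Int :=
  (pvMovesB n).foldl pvExpandStep acc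

-- one `while` iteration's two nested for-loops: returns (nxt, visited)
def pvExpand (frontier : PySem.Set Int) (visited : PySem.Set Int) :
    PySem.Set Int × PySem.Set Int :=
  frontier.foldl pvExpandNode (PySem.Set.empty, visited)

def pvRunB (target : Int) : Nat → PySem.Set Int → PySem.Set Int → Int → Int
  | 0, _, _, _ => 0
  | Nat.succ fuel, frontier, visited, t =>
    if PySem.Set.contains frontier target then t
    else
      let p := pvExpand frontier visited
      pvRunB target fuel p.1 p.2 (t + 1)

def get_time_alt (now : Int) (target : Int) : Int :=
  pvRunB target (pvFuel now target) (PySem.Set.ofList [now]) (PySem.Set.ofList [now]) 0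

-- ===== PRECONDITION & SPEC =====
def Spec_get_time (now : Int) (target : Int) (out : Int) : Prop := out = get_time_alt now target
instance (now : Int) (target : Int) (out : Int) : Decidable (Spec_get_time now target out) := by
  unfold Spec_get_time; infer_instance

-- ===== CLAIM (what is proved, stated in full; the proofs are below) =====
def Claim_equal_get_time : Prop := ∀ (now : Int) (target : Int), Dom_get_time now target → Spec_get_time now target (get_time now target)

-- ===== LEMMAS AND PROOFS =====

-- the neighbour list inside an entry is exactly B's move list
theorem pvNextListA_fst (d n : Int) : (pvNextListA d n).1 = d + 1 := rfl

theorem pvNextListA_snd (d n : Int) : (pvNextListA d n).2 = pvMovesB n := rfl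

-- all states of the current level, in order
def pvElems (lvl : List (Int × List Int)) : List Int := lvl.flatMap (fun e => e.2)

theorem pvElems_cons (e : Int × List Int) (rest : List (Int × List Int)) :
    pvElems (e :: rest) = e.2 ++ pvElems rest := by simp [pvElems]

theorem pvScanEntryA_eq (target d : Int) (ns : List Int) :
    pvScanEntryA target d ns =
      if target ∈ ns then Sum.inl d else Sum.inr (ns.map (pvNextListA d)) := by
  induction ns with
  | nil => simp [pvScanEntryA]
  | cons n rest ih =>
    simp only [pvScanEntryA, ih, List.mem_cons]
    by_cases h : n = target
    · subst h; simp
    · have h' : ¬ target = n := fun hc => h hc.symm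
      rw [if_neg h]
      by_cases hm : target ∈ rest
      · simp [hm, h']
      · simp [hm, h']

theorem pvScanLevelA_inl (target t : Int) (lvl : List (Int × List Int))
    (h1 : ∀ e ∈ lvl, e.1 = t) (h : target ∈ pvElems lvl) :
    pvScanLevelA target lvl = Sum.inl t := by
  induction lvl with
  | nil => simp [pvElems] at h
  | cons e rest ih =>
    simp only [pvScanLevelA, pvScanEntryA_eq]
    by_cases he : target ∈ e.2
    · have := h1 e (by simp)
      simp [he, this]
    · have hr : target ∈ pvElems rest := by
        rw [pvElems_cons, List.mem_append] at h
        exact h.resolve_left he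
      simp only [he, if_false]
      rw [ih (fun e' he' => h1 e' (by simp [he'])) hr]

theorem pvScanLevelA_inr (target : Int) (lvl : List (Int × List Int))
    (h : target ∉ pvElems lvl) :
    pvScanLevelA target lvl =
      Sum.inr (lvl.flatMap (fun e => e.2.map (pvNextListA e.1))) := by
  induction lvl with
  | nil => simp [pvScanLevelA]
  | cons e rest ih =>
    rw [pvElems_cons, List.mem_append] at h
    push Not at h
    obtain ⟨he, hr⟩ := h
    simp only [pvScanLevelA, pvScanEntryA_eq, he, if_false, ih hr, List.flatMap_cons]

-- membership in the next level's states
theorem mem_pvElems_next (lvl : List (Int × List Int)) (x : Int) :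
    x ∈ pvElems (lvl.flatMap (fun e => e.2.map (pvNextListA e.1))) ↔
      ∃ n ∈ pvElems lvl, x ∈ pvMovesB n := by
  simp only [pvElems, List.mem_flatMap, List.mem_map]
  constructor
  · rintro ⟨e', ⟨e, he, n, hn, rfl⟩, hx⟩
    exact ⟨n, ⟨e, he, hn⟩, by rwa [pvNextListA_snd] at hx⟩
  · rintro ⟨n, ⟨e, he, hn⟩, hx⟩
    exact ⟨pvNextListA e.1 n, ⟨e, he, n, hn, rfl⟩, by rwa [pvNextListA_snd]⟩

-- fold over one node's moves: visited accumulates the moves …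
theorem mem_foldl_step_2 (ms : List Int) (acc : PySem.Set Int × PySem.Set Int) (x : Int) :
    x ∈ (ms.foldl pvExpandStep acc).2 ↔ x ∈ acc.2 ∨ x ∈ ms := by
  induction ms generalizing acc with
  | nil => simp
  | cons m ms ih =>
    simp only [List.foldl_cons, ih, pvExpandStep]
    by_cases hm : m ∈ acc.2
    · rw [if_pos (by simpa [PySem.Set.contains_iff] using hm)]
      by_cases hxm : x = m
      · subst hxm; simp [hm]
      · simp [hxm]
    · rw [if_neg (by simpa [PySem.Set.contains_iff] using hm)]
      simp only [PySem.Set.mem_add, List.mem_cons]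
      tauto
  -- … and nxt gets exactly the not-yet-visited ones
theorem mem_foldl_step_1 (ms : List Int) (acc : PySem.Set Int × PySem.Set Int) (x : Int) :
    x ∈ (ms.foldl pvExpandStep acc).1 ↔ x ∈ acc.1 ∨ (x ∈ ms ∧ x ∉ acc.2) := by
  induction ms generalizing acc with
  | nil => simp
  | cons m ms ih =>
    simp only [List.foldl_cons, ih, pvExpandStep]
    by_cases hm : m ∈ acc.2
    · rw [if_pos (by simpa [PySem.Set.contains_iff] using hm)]
      by_cases hxm : x = m
      · subst hxm; simp [hm]
      · simp [hxm]
    · rw [if_neg (by simpa [PySem.Set.contains_iff] using hm)]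
      simp only [PySem.Set.mem_add, List.mem_cons]
      by_cases hxm : x = m
      · subst hxm; simp [hm]
      · simp only [hxm, or_false, false_or]

-- the same two facts for the fold over the whole frontier
theorem mem_expand_fold_2 (fs : List Int) (acc : PySem.Set Int × PySem.Set Int) (x : Int) :
    x ∈ (fs.foldl pvExpandNode acc).2 ↔ x ∈ acc.2 ∨ ∃ n ∈ fs, x ∈ pvMovesB n := by
  induction fs generalizing acc with
  | nil => simp
  | cons n fs ih =>
    simp only [List.foldl_cons, ih, pvExpandNode, mem_foldl_step_2, List.mem_cons]
    constructor
    · rintro ((h | h) | ⟨n', h1, h2⟩)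
      · tauto
      · exact Or.inr ⟨n, Or.inl rfl, h⟩
      · exact Or.inr ⟨n', Or.inr h1, h2⟩
    · rintro (h | ⟨n', h1 | h1, h2⟩)
      · tauto
      · subst h1; tauto
      · exact Or.inr ⟨n', h1, h2⟩

theorem mem_expand_fold_1 (fs : List Int) (acc : PySem.Set Int × PySem.Set Int) (x : Int) :
    x ∈ (fs.foldl pvExpandNode acc).1 ↔
      x ∈ acc.1 ∨ ((∃ n ∈ fs, x ∈ pvMovesB n) ∧ x ∉ acc.2) := by
  induction fs generalizing acc with
  | nil => simp
  | cons n fs ih =>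
    simp only [List.foldl_cons, ih, pvExpandNode, mem_foldl_step_1, mem_foldl_step_2,
      List.mem_cons]
    constructor
    · rintro ((h | h) | ⟨⟨n', h1, h2⟩, h3⟩)
      · tauto
      · exact Or.inr ⟨⟨n, Or.inl rfl, h.1⟩, h.2⟩
      · exact Or.inr ⟨⟨n', Or.inr h1, h2⟩, fun hc => h3 (Or.inl hc)⟩
    · rintro (h | ⟨⟨n', h1 | h1, h2⟩, h3⟩)
      · tauto
      · subst h1; exact Or.inl (Or.inr ⟨h2, h3⟩)
      · by_cases hn : x ∈ pvMovesB n
        · exact Or.inl (Or.inr ⟨hn, h3⟩)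
        · exact Or.inr ⟨⟨n', h1, h2⟩, fun hc => by
            rcases hc with hc | hc
            · exact h3 hc
            · exact hn hc⟩

theorem mem_pvExpand_2 (frontier visited : PySem.Set Int) (x : Int) :
    x ∈ (pvExpand frontier visited).2 ↔ x ∈ visited ∨ ∃ n ∈ frontier, x ∈ pvMovesB n := by
  simpa [pvExpand, PySem.Set.empty] using mem_expand_fold_2 frontier (PySem.Set.empty, visited) x

theorem mem_pvExpand_1 (frontier visited : PySem.Set Int) (x : Int) :
    x ∈ (pvExpand frontier visited).1 ↔
      (∃ n ∈ frontier, x ∈ pvMovesB n) ∧ x ∉ visited := by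
  simpa [pvExpand, PySem.Set.empty] using mem_expand_fold_1 frontier (PySem.Set.empty, visited) x

-- main invariant-carrying induction: the unpruned level and the pruned frontier
-- first contain the target at the same step
theorem pvRun_eq (target : Int) (fuel : Nat) :
    ∀ (lvl : List (Int × List Int)) (frontier visited : PySem.Set Int) (t : Int),
      (∀ e ∈ lvl, e.1 = t) →
      (∀ x ∈ frontier, x ∈ pvElems lvl) →
      (∀ x ∈ pvElems lvl, x ∈ visited) →
      (∀ x ∈ visited, x ∉ frontier → ∀ y ∈ pvMovesB x, y ∈ visited) →
      (target ∈ pvElems lvl ↔ target ∈ frontier) →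
      (target ∈ visited → target ∈ frontier) →
      pvRunA target fuel lvl = pvRunB target fuel frontier visited t := by
  induction fuel with
  | zero => intros; rfl
  | succ fuel ih =>
    intro lvl frontier visited t h1 h2 h3 h4 h5 h6
    by_cases hT : target ∈ pvElems lvl
    · have hF : target ∈ frontier := h5.mp hT
      rw [pvRunA, pvRunB, pvScanLevelA_inl target t lvl h1 hT,
        if_pos (by simpa [PySem.Set.contains_iff] using hF)]
    · have hF : target ∉ frontier := fun hc => hT (h5.mpr hc)
      have hV : target ∉ visited := fun hc => hF (h6 hc)
      rw [pvRunA, pvRunB, pvScanLevelA_inr target lvl hT,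
        if_neg (by simpa [PySem.Set.contains_iff] using hF)]
      apply ih
      · -- depths all t + 1
        intro e' he'
        simp only [List.mem_flatMap, List.mem_map] at he'
        obtain ⟨e, he, n, _, rfl⟩ := he'
        rw [pvNextListA_fst, h1 e he]
      · -- new frontier ⊆ new level
        intro x hx
        rw [mem_pvExpand_1] at hx
        rw [mem_pvElems_next]
        obtain ⟨⟨n, hn, hm⟩, _⟩ := hx
        exact ⟨n, h2 n hn, hm⟩
      · -- new level ⊆ new visited
        intro x hx
        rw [mem_pvElems_next] at hx
        obtain ⟨n, hn, hm⟩ := hx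
        rw [mem_pvExpand_2]
        by_cases hnf : n ∈ frontier
        · exact Or.inr ⟨n, hnf, hm⟩
        · exact Or.inl (h4 n (h3 n hn) hnf x hm)
      · -- new visited closed off the new frontier
        intro x hx hxf
        rw [mem_pvExpand_2] at hx
        have hxv : x ∈ visited := by
          rcases hx with hx | hx
          · exact hx
          · by_contra hxv
            exact hxf ((mem_pvExpand_1 frontier visited x).mpr ⟨hx, hxv⟩)
        intro y hy
        rw [mem_pvExpand_2]
        by_cases hxoldf : x ∈ frontier
        · exact Or.inr ⟨x, hxoldf, hy⟩
        · exact Or.inl (h4 x hxv hxoldf y hy)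
      · -- target in new level ↔ target in new frontier
        rw [mem_pvElems_next, mem_pvExpand_1]
        constructor
        · rintro ⟨n, hn, hm⟩
          by_cases hnf : n ∈ frontier
          · exact ⟨⟨n, hnf, hm⟩, hV⟩
          · exact absurd (h6 (h4 n (h3 n hn) hnf target hm)) hF
        · rintro ⟨⟨n, hn, hm⟩, _⟩
          exact ⟨n, h2 n hn, hm⟩
      · -- target visited → target in new frontier
        intro hx
        rw [mem_pvExpand_2] at hx
        rcases hx with hx | hx
        · exact absurd (h6 hx) hF
        · exact (mem_pvExpand_1 frontier visited target).mpr ⟨hx, hV⟩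

-- ===== VERDICT (by name: the statement is the Claim_ definition above) =====
theorem get_time_spec : Claim_equal_get_time := by
  intro now target _
  show get_time now target = get_time_alt now target
  unfold get_time get_time_alt
  apply pvRun_eq
  · intro e he; simp at he; simp [he]
  · intro x hx
    simp [PySem.Set.mem_ofList] at hx
    simp [pvElems, hx]
  · intro x hx
    simp [pvElems] at hx
    simp [PySem.Set.mem_ofList, hx]
  · intro x hx hxf
    exact absurd hx hxf
  · simp [pvElems, PySem.Set.mem_ofList]
  · intro h
    simpa [PySem.Set.mem_ofList] using h
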